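-- pv_equiv track=rewrite | github.com/RussAbbott/pylog | pylog/examples/yield_vs_return.py | transversal_dfs_all
-- ===== SOURCE A (Python) =====
-- from typing import List, Optional
--
-- def transversal_dfs_all(Sets: List[List[int]], So_Far: List[int]) -> List[List[int]]:
--   if not Sets:
--     return [So_Far]
--   else:
--     [S, *Ss] = Sets
--     Ans = []
--     for X in S:
--       if X not in So_Far:
--         Ans += transversal_dfs_all(Ss, So_Far + [X])
--     return Ans
-- ===== SOURCE B (Python) =====
-- from typing import List
--
-- def transversal_dfs_all(Sets: List[List[int]], So_Far: List[int]) -> List[List[int]]: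
--   partials = [So_Far]
--   for S in Sets:
--     partials = [p + [X] for p in partials for X in S if X not in p]
--   return partials
-- ===== Notes on version B (the rewrite author's own statement) =====
-- stated objective: alternative
-- what changed: Replaces the recursion over Sets with an iterative breadth-first fold: a list of partial transversals is extended set by set with a comprehension, instead of a depth-first recursive accumulation.
import Mathlib
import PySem

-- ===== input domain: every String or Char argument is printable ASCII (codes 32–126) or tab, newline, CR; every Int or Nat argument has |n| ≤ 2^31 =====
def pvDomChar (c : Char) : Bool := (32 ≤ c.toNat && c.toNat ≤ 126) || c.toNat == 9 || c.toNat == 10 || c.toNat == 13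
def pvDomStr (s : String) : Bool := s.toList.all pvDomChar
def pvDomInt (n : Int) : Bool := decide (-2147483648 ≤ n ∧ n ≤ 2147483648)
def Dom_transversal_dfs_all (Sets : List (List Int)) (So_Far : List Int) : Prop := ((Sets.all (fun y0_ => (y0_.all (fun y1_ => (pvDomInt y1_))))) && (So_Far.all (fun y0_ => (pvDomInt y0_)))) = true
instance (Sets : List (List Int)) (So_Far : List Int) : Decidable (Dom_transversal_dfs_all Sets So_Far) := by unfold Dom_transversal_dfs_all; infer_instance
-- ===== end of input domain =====

-- B replaces A's depth-first recursion over Sets by an iterative fold that extends a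
-- list of partial transversals set by set (objective: alternative decomposition).

-- ===== PORT A =====
def transversal_dfs_all : List (List Int) → List Int → List (List Int)
  | [], So_Far => [So_Far]
  | S :: Ss, So_Far =>
      -- Ans = []; for X in S: if X not in So_Far: Ans += transversal_dfs_all(Ss, So_Far + [X])
      S.foldl (fun Ans X =>
        if X ∈ So_Far then Ans
        else Ans ++ transversal_dfs_all Ss (So_Far ++ [X])) []

-- ===== PORT B =====
def transversal_dfs_all_alt (Sets : List (List Int)) (So_Far : List Int) : List (List Int) :=
  -- partials = [So_Far]; for S in Sets: partials = [p + [X] for p in partials for X in S if X not in p]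
  Sets.foldl (fun partials S =>
    partials.flatMap (fun p => (S.filter (fun X => decide (X ∉ p))).map (fun X => p ++ [X]))) [So_Far]

-- ===== PRECONDITION & SPEC =====
def Spec_transversal_dfs_all (Sets : List (List Int)) (So_Far : List Int) (out : List (List Int)) : Prop := out = transversal_dfs_all_alt Sets So_Far
instance (Sets : List (List Int)) (So_Far : List Int) (out : List (List Int)) : Decidable (Spec_transversal_dfs_all Sets So_Far out) := by unfold Spec_transversal_dfs_all; infer_instance

-- ===== CLAIM (what is proved, stated in full; the proofs are below) =====
def Claim_equal_transversal_dfs_all : Prop := ∀ (Sets : List (List Int)) (So_Far : List Int), Dom_transversal_dfs_all Sets So_Far → Spec_transversal_dfs_all Sets So_Far (transversal_dfs_all Sets So_Far)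

-- ===== LEMMAS AND PROOFS =====

-- A's inner loop over one set, started from any accumulator, equals the
-- filter-map-flatMap expression B's comprehension step produces for that set.
theorem transversal_loopA (Ss : List (List Int)) (p : List Int) :
    ∀ (S : List Int) (acc : List (List Int)),
      S.foldl (fun Ans X =>
        if X ∈ p then Ans
        else Ans ++ transversal_dfs_all Ss (p ++ [X])) acc
      = acc ++ ((S.filter (fun X => decide (X ∉ p))).map (fun X => p ++ [X])).flatMap
          (fun q => transversal_dfs_all Ss q) := by
  intro S
  induction S with
  | nil => simp
  | cons X S ih =>
      intro acc
      by_cases hX : X ∈ p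
      · simp [List.foldl_cons, hX, ih]
      · simp [List.foldl_cons, hX, ih, List.append_assoc]

-- Folding B's step over Sets from any list of partials flat-maps A over the partials.
theorem transversal_fold_eq (Sets : List (List Int)) :
    ∀ (ps : List (List Int)),
      Sets.foldl (fun partials S =>
        partials.flatMap (fun p => (S.filter (fun X => decide (X ∉ p))).map (fun X => p ++ [X]))) ps
      = ps.flatMap (fun p => transversal_dfs_all Sets p) := by
  induction Sets with
  | nil => intro ps; simp [transversal_dfs_all]
  | cons S Ss ih =>
      intro ps
      simp only [List.foldl_cons, ih, List.flatMap_assoc]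
      apply List.flatMap_congr
      intro p
      rw [show transversal_dfs_all (S :: Ss) p
            = S.foldl (fun Ans X => if X ∈ p then Ans
                else Ans ++ transversal_dfs_all Ss (p ++ [X])) [] from rfl,
          transversal_loopA Ss p S []]
      simp

-- ===== VERDICT (by name: the statement is the Claim_ definition above) =====
theorem transversal_dfs_all_spec : Claim_equal_transversal_dfs_all := by
  intro Sets So_Far _
  show transversal_dfs_all Sets So_Far = transversal_dfs_all_alt Sets So_Far
  rw [transversal_dfs_all_alt, transversal_fold_eq Sets [So_Far]]
  simp
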